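-- pv_equiv track=rewrite | github.com/majidraza1228/MasteringPython | DevByte3.py | vowel_max
-- ===== SOURCE A (Python) =====
-- def vowel_max(s) :
--     vowels = 'aeiou'
--     max_len = 0
--     start_idx = 0
--     for i in range(len(s)) :
--         if s[i] in vowels :
--             if s.count(s[i]) % 2 == 0 :
--                 max_len = max(max_len, i - start_idx + 1)
--             else :
--                 start_idx = i + 1
--     return max_len
-- ===== SOURCE B (Python) =====
-- def vowel_max(s):
--     vowels = 'aeiou'
--     odd = [v for v in vowels if s.count(v) % 2 == 1]
--     breaks = [i for i, c in enumerate(s) if c in odd]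
--     best = 0
--     seg_start = 0
--     for b in breaks + [len(s)]:
--         j = next((j for j in range(b - 1, seg_start - 1, -1)
--                   if s[j] in vowels and s[j] not in odd), None)
--         if j is not None and j - seg_start + 1 > best:
--             best = j - seg_start + 1
--         seg_start = b + 1
--     return best
-- ===== Notes on version B (the rewrite author's own statement) =====
-- stated objective: alternative
-- what changed: B replaces A's single stateful forward pass (which re-counts the current character with s.count at every vowel position) by a staged algorithm: it first determines which vowels occur an odd number of times (5 count calls), collects their positions as break points, and then answers each segment by a backward search for its last even-count vowel.
import Mathlib
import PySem

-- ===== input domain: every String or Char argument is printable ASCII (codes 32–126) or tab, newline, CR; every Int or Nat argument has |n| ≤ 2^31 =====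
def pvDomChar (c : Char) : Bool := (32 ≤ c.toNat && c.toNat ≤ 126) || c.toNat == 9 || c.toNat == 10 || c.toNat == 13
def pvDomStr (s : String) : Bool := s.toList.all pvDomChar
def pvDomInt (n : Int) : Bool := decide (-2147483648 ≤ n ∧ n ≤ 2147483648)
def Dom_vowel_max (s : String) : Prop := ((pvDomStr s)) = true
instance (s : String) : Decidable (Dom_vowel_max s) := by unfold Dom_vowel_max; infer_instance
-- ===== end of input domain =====

-- B first marks the vowels of odd total count, collects their positions as break points,
-- then searches each segment backwards for its last even-count vowel (objective: alternative).

-- ===== PORT A =====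
-- literal port: for i in range(len(s)); s[i] via pyGetD (i is always in range, so the default is never used)
def vowel_max (s : String) : Int :=
  let vowels := "aeiou".toList
  let cs := s.toList
  let st := (PySem.List.pyRange 0 (cs.length : Int) 1).foldl
    (fun (st : Int × Int) i =>
      if PySem.Chars.isIn [PySem.List.pyGetD cs i ' '] vowels then
        if PySem.Int.mod ((PySem.Chars.count cs [PySem.List.pyGetD cs i ' '] : Int)) 2 == 0 then
          (max st.1 (i - st.2 + 1), st.2)
        else (st.1, i + 1)
      else st) (0, 0)
  st.1

-- ===== PORT B =====
-- odd = vowels of odd total count; breaks = their positions; per segment, the Python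
-- next(... for j in range(b-1, seg_start-1, -1) if ...) is find? over the descending range
def vowel_max_alt (s : String) : Int :=
  let cs := s.toList
  let vowels := "aeiou".toList
  let odd := vowels.filter (fun v => PySem.Int.mod ((PySem.Chars.count cs [v] : Int)) 2 == 1)
  let breaks := ((PySem.List.enumerate cs).filter (fun p => odd.contains p.2)).map (fun p => p.1)
  let st := (breaks ++ [(cs.length : Int)]).foldl
    (fun (st : Int × Int) b =>
      match (PySem.List.pyRange (b - 1) (st.2 - 1) (-1)).find?
          (fun j => PySem.Chars.isIn [PySem.List.pyGetD cs j ' '] vowels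
                    && ! odd.contains (PySem.List.pyGetD cs j ' ')) with
      | some j => (if j - st.2 + 1 > st.1 then j - st.2 + 1 else st.1, b + 1)
      | none => (st.1, b + 1)) (0, 0)
  st.1

-- ===== PRECONDITION & SPEC =====
def Spec_vowel_max (s : String) (out : Int) : Prop := out = vowel_max_alt s
instance (s : String) (out : Int) : Decidable (Spec_vowel_max s out) := by unfold Spec_vowel_max; infer_instance

-- ===== CLAIM (what is proved, stated in full; the proofs are below) =====
def Claim_equal_vowel_max : Prop := ∀ (s : String), Dom_vowel_max s → Spec_vowel_max s (vowel_max s)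

-- ===== LEMMAS AND PROOFS =====

-- 'c in vowels' (substring test on a 1-char needle) is membership
lemma isIn_singleton_eq_contains (c : Char) (l : List Char) :
    PySem.Chars.isIn [c] l = l.contains c := by
  rcases h : l.contains c with _|_
  · rw [PySem.Chars.isIn_eq_false_iff]
    intro hin
    have : c ∈ l := (List.singleton_infix_iff c l).mp hin
    simp_all
  · rw [PySem.Chars.isIn_iff_infix]
    exact (List.singleton_infix_iff c l).mpr (by simpa using h)

-- for x % 2, '== 1' is the negation of '== 0'
lemma mod_two_one_eq_not_zero (x : Int) :
    (PySem.Int.mod x 2 == 1) = !(PySem.Int.mod x 2 == 0) := by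
  have h1 := PySem.Int.mod_nonneg x (b := 2) (by norm_num)
  have h2 := PySem.Int.mod_lt x (b := 2) (by norm_num)
  interval_cases h : PySem.Int.mod x 2 <;> simp

-- the descending range is strictly decreasing
lemma pyRange_one_pairwise_lt (a b : Int) :
    ∀ (k : Nat), (b - a).toNat = k → (PySem.List.pyRange a b 1).Pairwise (· < ·) := by
  intro k
  induction k generalizing a with
  | zero =>
    intro hk
    have : PySem.List.pyRange a b 1 = [] := by
      apply List.eq_nil_of_length_eq_zero
      simp [PySem.List.length_pyRange_one, hk]
    rw [this]; exact List.Pairwise.nil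
  | succ k ih =>
    intro hk
    have hab : a < b := by omega
    rw [PySem.List.pyRange_one_cons hab]
    refine List.Pairwise.cons ?_ (ih (a + 1) (by omega))
    intro x hx
    rw [PySem.List.mem_pyRange_one] at hx
    omega
-- on a strictly decreasing list, find? returns a match at least as large as any match
lemma find_desc_ge (G : Int → Bool) :
    ∀ (l : List Int), l.Pairwise (· > ·) → ∀ j, j ∈ l → G j = true →
    ∃ j0, l.find? G = some j0 ∧ j ≤ j0 := by
  intro l
  induction l with
  | nil => intro _ j hj; simp at hj
  | cons a t ih =>
    intro hp j hj hG
    rcases List.pairwise_cons.mp hp with ⟨ha, ht⟩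
    rcases hGa : G a with _|_
    · have hjt : j ∈ t := by
        rcases List.mem_cons.mp hj with h | h
        · subst h; rw [hGa] at hG; exact absurd hG (by simp)
        · exact h
      rcases ih ht j hjt hG with ⟨j0, hf, hle⟩
      exact ⟨j0, by simp [hGa, hf], hle⟩
    · refine ⟨a, by simp [hGa], ?_⟩
      rcases List.mem_cons.mp hj with h | h
      · omega
      · exact le_of_lt (ha j h)

-- the value a closing segment scan computes equals A's running maximum, given the invariant
lemma seg_scalar (G : Int → Bool) (st i ma mb : Int)
    (H1 : mb ≤ ma)
    (H2 : ∀ j, st ≤ j → j < i → G j = true → j - st + 1 ≤ ma)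
    (H3 : ma ≤ mb ∨ ∃ j, st ≤ j ∧ j < i ∧ G j = true ∧ ma ≤ max mb (j - st + 1)) :
    ∀ (X : Int),
    (match (PySem.List.pyRange (i - 1) (st - 1) (-1)).find? G with
     | some j => ((if j - st + 1 > mb then j - st + 1 else mb, X) : Int × Int)
     | none => (mb, X)) = (ma, X) := by
  intro X
  have hdesc : (PySem.List.pyRange (i - 1) (st - 1) (-1)).Pairwise (· > ·) := by
    rw [PySem.List.pyRange_neg_one_eq_reverse, List.pairwise_reverse]
    exact pyRange_one_pairwise_lt _ _ _ rfl
  rcases hf : (PySem.List.pyRange (i - 1) (st - 1) (-1)).find? G with _ | j0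
  · have hnone := List.find?_eq_none.mp hf
    rcases H3 with h | ⟨j, hj1, hj2, hj3, _⟩
    · simp only [Prod.mk.injEq, and_true]; omega
    · exfalso
      have : j ∈ PySem.List.pyRange (i - 1) (st - 1) (-1) := by
        rw [PySem.List.mem_pyRange_neg_one]; omega
      simp [hnone j this] at hj3
  · have hGj0 : G j0 = true := List.find?_some hf
    have hj0mem := List.mem_of_find?_eq_some hf
    rw [PySem.List.mem_pyRange_neg_one] at hj0mem
    have hj0le : j0 - st + 1 ≤ ma := H2 j0 (by omega) (by omega) hGj0
    have hub : ma ≤ max mb (j0 - st + 1) := by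
      rcases H3 with h | ⟨j, hj1, hj2, hj3, hj4⟩
      · omega
      · have : j ∈ PySem.List.pyRange (i - 1) (st - 1) (-1) := by
          rw [PySem.List.mem_pyRange_neg_one]; omega
        rcases find_desc_ge G _ hdesc j this hj3 with ⟨j0', hf', hle⟩
        rw [hf] at hf'
        have hj00 : j0' = j0 := by injection hf' with h; exact h.symm
        rw [hj00] at hle
        rcases max_cases mb (j - st + 1) with ⟨he, _⟩ | ⟨he, _⟩ <;>
          rcases max_cases mb (j0 - st + 1) with ⟨he2, _⟩ | ⟨he2, _⟩ <;> omega
    rcases max_cases mb (j0 - st + 1) with ⟨he, hc⟩ | ⟨he, hc⟩ <;>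
      · simp only [Prod.mk.injEq, and_true]; split <;> omega

-- MAIN: A's forward scan from index i equals B's walk over the remaining break points,
-- where ma already includes the goods of the open segment [st, i) and mb does not.
lemma main_lemma (G Bd : Int → Bool) (n : Int) :
    ∀ (k : Nat) (i ma mb st : Int), i = n - (k : Int) → st ≤ i → i ≤ n →
    mb ≤ ma →
    (∀ j, st ≤ j → j < i → G j = true → j - st + 1 ≤ ma) →
    (ma ≤ mb ∨ ∃ j, st ≤ j ∧ j < i ∧ G j = true ∧ ma ≤ max mb (j - st + 1)) →
    ((PySem.List.pyRange i n 1).foldl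
       (fun (p : Int × Int) j =>
         if Bd j then (p.1, j + 1)
         else if G j then (max p.1 (j - p.2 + 1), p.2) else p) (ma, st)).1
    = (((PySem.List.pyRange i n 1).filter Bd ++ [n]).foldl
       (fun (p : Int × Int) b =>
         match (PySem.List.pyRange (b - 1) (p.2 - 1) (-1)).find? G with
         | some j => (if j - p.2 + 1 > p.1 then j - p.2 + 1 else p.1, b + 1)
         | none => (p.1, b + 1)) (mb, st)).1 := by
  intro k
  induction k with
  | zero =>
    intro i ma mb st hi hsti hin H1 H2 H3
    have hie : i = n := by omega
    subst hie
    have hr : PySem.List.pyRange i i 1 = [] := by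
      apply List.eq_nil_of_length_eq_zero; simp
    rw [hr]
    simp only [List.filter_nil, List.nil_append, List.foldl_nil, List.foldl_cons]
    rw [seg_scalar G st i ma mb H1 H2 H3 (i + 1)]
  | succ k ih =>
    intro i ma mb st hi hsti hin H1 H2 H3
    have hlt : i < n := by omega
    rw [PySem.List.pyRange_one_cons hlt]
    simp only [List.foldl_cons, List.filter_cons]
    rcases hBd : Bd i with _|_
    · simp only [Bool.false_eq_true, if_false]
      rcases hG : G i with _|_
      · -- neither break nor good at i: both sides unchanged
        simp only [Bool.false_eq_true, if_false]
        refine ih (i + 1) ma mb st (by omega) (by omega) (by omega) H1 ?_ ?_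
        · intro j h1 h2 h3
          rcases (by omega : j < i ∨ j = i) with h | h
          · exact H2 j h1 h h3
          · subst h; rw [hG] at h3; exact absurd h3 (by simp)
        · rcases H3 with h | ⟨j, hj1, hj2, hj3, hj4⟩
          · exact Or.inl h
          · exact Or.inr ⟨j, hj1, by omega, hj3, hj4⟩
      · -- good at i: A folds it into ma, B will re-find it at the segment end
        simp only [if_true]
        refine ih (i + 1) (max ma (i - st + 1)) mb st (by omega) (by omega) (by omega)
          (le_trans H1 (le_max_left _ _)) ?_ ?_
        · intro j h1 h2 h3
          rcases (by omega : j < i ∨ j = i) with h | h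
          · exact le_trans (H2 j h1 h h3) (le_max_left _ _)
          · subst h; exact le_max_right _ _
        · refine Or.inr ⟨i, by omega, by omega, hG, ?_⟩
          rcases H3 with h | ⟨j, hj1, hj2, hj3, hj4⟩
          · rcases max_cases mb (i - st + 1) with ⟨he, hc⟩ | ⟨he, hc⟩ <;>
              rcases max_cases ma (i - st + 1) with ⟨he', hc'⟩ | ⟨he', hc'⟩ <;> omega
          · rcases max_cases mb (j - st + 1) with ⟨he, hc⟩ | ⟨he, hc⟩ <;>
              rcases max_cases mb (i - st + 1) with ⟨he2, hc2⟩ | ⟨he2, hc2⟩ <;>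
              rcases max_cases ma (i - st + 1) with ⟨he', hc'⟩ | ⟨he', hc'⟩ <;> omega
    · -- break at i: B closes the segment, producing exactly ma, and both restart at i+1
      simp only [if_true, List.cons_append, List.foldl_cons]
      rw [seg_scalar G st i ma mb H1 H2 H3 (i + 1)]
      exact ih (i + 1) ma ma (i + 1) (by omega) (by omega) (by omega) le_rfl
        (by intro j h1 h2 h3; omega) (Or.inl le_rfl)

-- contains on a filtered list
lemma contains_filter_of_mem {a : Type} [BEq a] [LawfulBEq a] (l : List a) (p : a → Bool)
    (c : a) (hc : c ∈ l) : (l.filter p).contains c = p c := by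
  rcases h : p c with _|_ <;> simp [List.mem_filter, h, hc]
lemma contains_filter_of_not_mem {a : Type} [BEq a] [LawfulBEq a] (l : List a) (p : a → Bool)
    (c : a) (hc : ¬ c ∈ l) : (l.filter p).contains c = false := by
  simp [List.mem_filter, hc]

-- membership of a char in the odd-vowel list, as a boolean on the char
lemma contains_odd_eq (cs : List Char) (c : Char) :
    (("aeiou".toList.filter
        (fun v => PySem.Int.mod ((PySem.Chars.count cs [v] : Int)) 2 == 1)).contains c)
    = (PySem.Chars.isIn [c] "aeiou".toList
       && !(PySem.Int.mod ((PySem.Chars.count cs [c] : Int)) 2 == 0)) := by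
  rw [isIn_singleton_eq_contains]
  by_cases hc : c ∈ "aeiou".toList
  · have h1 : ("aeiou".toList.contains c) = true := by simpa using hc
    rw [contains_filter_of_mem _ _ _ hc, h1, Bool.true_and, mod_two_one_eq_not_zero]
  · have h1 : ("aeiou".toList.contains c) = false := by simpa using hc
    rw [contains_filter_of_not_mem _ _ _ hc, h1, Bool.false_and]

-- the two index predicates: good (even-count vowel) and break (odd-count vowel)
def Gfun (cs : List Char) (i : Int) : Bool :=
  PySem.Chars.isIn [PySem.List.pyGetD cs i ' '] "aeiou".toList
  && (PySem.Int.mod ((PySem.Chars.count cs [PySem.List.pyGetD cs i ' '] : Int)) 2 == 0)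
def Bfun (cs : List Char) (i : Int) : Bool :=
  PySem.Chars.isIn [PySem.List.pyGetD cs i ' '] "aeiou".toList
  && !(PySem.Int.mod ((PySem.Chars.count cs [PySem.List.pyGetD cs i ' '] : Int)) 2 == 0)

-- A's loop body in break-first form
lemma bodyA (cs : List Char) :
    (fun (st : Int × Int) (i : Int) =>
      if PySem.Chars.isIn [PySem.List.pyGetD cs i ' '] "aeiou".toList then
        if PySem.Int.mod ((PySem.Chars.count cs [PySem.List.pyGetD cs i ' '] : Int)) 2 == 0 then
          (max st.1 (i - st.2 + 1), st.2)
        else (st.1, i + 1)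
      else st)
    = (fun (st : Int × Int) (i : Int) =>
      if Bfun cs i then (st.1, i + 1)
      else if Gfun cs i then (max st.1 (i - st.2 + 1), st.2) else st) := by
  funext st i
  unfold Gfun Bfun
  rcases h1 : PySem.Chars.isIn [PySem.List.pyGetD cs i ' '] "aeiou".toList with _|_ <;>
    rcases h2 : (PySem.Int.mod ((PySem.Chars.count cs [PySem.List.pyGetD cs i ' '] : Int)) 2 == 0)
      with _|_ <;> simp

-- B's segment-scan test (vowel and not odd-count) is exactly the good predicate
lemma bodyB_pred (cs : List Char) :
    (fun j => PySem.Chars.isIn [PySem.List.pyGetD cs j ' '] "aeiou".toList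
      && ! (("aeiou".toList.filter
              (fun v => PySem.Int.mod ((PySem.Chars.count cs [v] : Int)) 2 == 1)).contains
            (PySem.List.pyGetD cs j ' ')))
    = Gfun cs := by
  funext j
  rw [contains_odd_eq]
  unfold Gfun
  rcases h1 : PySem.Chars.isIn [PySem.List.pyGetD cs j ' '] "aeiou".toList with _|_ <;>
    rcases h2 : (PySem.Int.mod ((PySem.Chars.count cs [PySem.List.pyGetD cs j ' '] : Int)) 2 == 0)
      with _|_ <;> simp

-- B's break positions are the indices satisfying the break predicate
lemma breaks_eq (cs : List Char) :
    (((PySem.List.enumerate cs).filter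
        (fun p => (("aeiou".toList.filter
            (fun v => PySem.Int.mod ((PySem.Chars.count cs [v] : Int)) 2 == 1)).contains
          p.2))).map (fun p => p.1))
    = (PySem.List.pyRange 0 (cs.length : Int) 1).filter (Bfun cs) := by
  rw [PySem.List.enumerate_eq_map_pyRange cs ' ', List.filter_map, List.map_map]
  have h1 : ((fun p : Int × Char => p.1) ∘ (fun j : Int => (j, PySem.List.pyGetD cs j ' ')))
      = id := rfl
  have h2 : ((fun p : Int × Char => (("aeiou".toList.filter
        (fun v => PySem.Int.mod ((PySem.Chars.count cs [v] : Int)) 2 == 1)).contains p.2))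
      ∘ (fun j : Int => (j, PySem.List.pyGetD cs j ' '))) = Bfun cs := by
    funext j
    simp only [Function.comp]
    rw [contains_odd_eq]
    rfl
  rw [h1, h2, List.map_id]
  simp [PySem.List.len_eq]

-- ===== VERDICT (by name: the statement is the Claim_ definition above) =====
theorem vowel_max_spec : Claim_equal_vowel_max := by
  intro s _
  unfold Spec_vowel_max
  simp only [vowel_max, vowel_max_alt]
  rw [bodyA, bodyB_pred, breaks_eq]
  exact main_lemma (Gfun s.toList) (Bfun s.toList) (s.toList.length : Int)
    s.toList.length 0 0 0 0 (by omega) le_rfl (by omega) le_rfl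
    (by intro j h1 h2 h3; omega) (Or.inl le_rfl)
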